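-- pv_equiv track=rewrite | github.com/hardik96bansal/Algorithm-DS-Practice | Algo/Dynamic Programming/sum.py | solve
-- ===== SOURCE A (Python) =====
-- def solve(num,lookup):
--     if(num==0):
--         return 1
--     if num<0:
--         return 0
--     if(lookup[num]!=-1):
--         return lookup[num]
--     lookup[num] = solve(num-1,lookup) + solve(num-3,lookup) + solve(num-5,lookup)
--     return lookup[num]
-- ===== SOURCE B (Python) =====
-- def solve(num, lookup):
--     # Bottom-up tabulation of the same recurrence; does not mutate `lookup`
--     # (A memoizes into it in place) -- return value is identical.
--     if num < 0:
--         return 0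
--     memo = [1]
--     for i in range(1, num + 1):
--         if lookup[i] != -1:
--             memo.append(lookup[i])
--         else:
--             memo.append(sum(memo[i - k] for k in (1, 3, 5) if i >= k))
--     return memo[num]
-- ===== Notes on version B (the rewrite author's own statement) =====
-- stated objective: alternative
-- what changed: Top-down memoized recursion that mutates the shared lookup list is replaced by an iterative bottom-up table filled from 0 to num (lookup is read but not mutated; the return value is identical).
import Mathlib
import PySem

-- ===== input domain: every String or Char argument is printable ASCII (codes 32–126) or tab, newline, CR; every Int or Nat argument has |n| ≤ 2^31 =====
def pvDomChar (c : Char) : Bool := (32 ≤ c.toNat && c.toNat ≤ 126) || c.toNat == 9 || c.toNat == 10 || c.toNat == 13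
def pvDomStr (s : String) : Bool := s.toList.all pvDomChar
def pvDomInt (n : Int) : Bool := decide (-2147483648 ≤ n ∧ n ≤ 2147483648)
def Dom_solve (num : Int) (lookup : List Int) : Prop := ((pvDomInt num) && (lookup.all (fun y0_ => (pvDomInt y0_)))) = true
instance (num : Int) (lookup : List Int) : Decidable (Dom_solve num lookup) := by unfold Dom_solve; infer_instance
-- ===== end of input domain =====

-- B replaces A's top-down memoized recursion by an iterative bottom-up table; A mutates
-- `lookup` in place while B does not, so the equivalence proved is about the RETURN value.

-- ===== PORT A =====
-- A threads the mutated list `lookup` through the recursion; `none` = IndexError.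
def solveAuxA (num : Int) (lookup : List Int) : Option (Int × List Int) :=
  if num = 0 then some (1, lookup)
  else if num < 0 then some (0, lookup)
  else
    match PySem.List.pyGet? lookup num with
    | none => none
    | some v =>
      if v ≠ -1 then some (v, lookup)
      else
        match solveAuxA (num - 1) lookup with
        | none => none
        | some (a, l1) =>
          match solveAuxA (num - 3) l1 with
          | none => none
          | some (b, l2) =>
            match solveAuxA (num - 5) l2 with
            | none => none
            | some (c, l3) =>
              match PySem.List.pySet? l3 num (a + b + c) with
              | none => none
              | some l4 =>
                match PySem.List.pyGet? l4 num with
                | none => none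
                | some r => some (r, l4)
termination_by num.toNat
decreasing_by all_goals omega

def solve (num : Int) (lookup : List Int) : Int :=
  match solveAuxA num lookup with
  | some (v, _) => v
  | none => 0   -- dead under Pre_solve (Python raises IndexError there)

-- ===== PORT B =====
-- the body of Source B's for-loop
def stepB (lookup : List Int) (memo : List Int) (i : Int) : List Int :=
  let v := PySem.List.pyGetD lookup i (-1)   -- in range under Pre_solve
  if v ≠ -1 then memo ++ [v]
  else memo ++ [([1, 3, 5].filter (fun k => decide (k ≤ i))).foldl
                  (fun s k => s + memo.getD (i - k).toNat 0) 0]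

def solve_alt (num : Int) (lookup : List Int) : Int :=
  if num < 0 then 0
  else
    let memo := (PySem.List.pyRange 1 (num + 1) 1).foldl (stepB lookup) [1]
    memo.getD num.toNat 0

-- ===== PRECONDITION & SPEC =====
-- Pre_ excludes exactly the inputs on which Python A raises IndexError (num > 0 with num ≥ len(lookup)).
def Pre_solve (num : Int) (lookup : List Int) : Prop := 0 < num → num < (lookup.length : Int)
instance (num : Int) (lookup : List Int) : Decidable (Pre_solve num lookup) := by
  unfold Pre_solve; infer_instance
def pvWitness_solve : Int × List Int := (4, [-1, -1, -1, 7, -1])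

def Spec_solve (num : Int) (lookup : List Int) (out : Int) : Prop := out = solve_alt num lookup
instance (num : Int) (lookup : List Int) (out : Int) : Decidable (Spec_solve num lookup out) := by unfold Spec_solve; infer_instance

-- ===== CLAIM (what is proved, stated in full; the proofs are below) =====
def Claim_equal_solve : Prop := ∀ (num : Int) (lookup : List Int), Dom_solve num lookup → Pre_solve num lookup → Spec_solve num lookup (solve num lookup)

-- ===== LEMMAS AND PROOFS =====

-- the pure recurrence both programs compute, read against the ORIGINAL lookup
def specF (lookup : List Int) (num : Int) : Int :=
  if num = 0 then 1
  else if num < 0 then 0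
  else
    let v := lookup.getD num.toNat (-1)
    if v ≠ -1 then v
    else specF lookup (num - 1) + specF lookup (num - 3) + specF lookup (num - 5)
termination_by num.toNat
decreasing_by all_goals omega

theorem specF_zero (lookup : List Int) : specF lookup 0 = 1 := by rw [specF]; simp

theorem specF_neg (lookup : List Int) (num : Int) (h : num < 0) : specF lookup num = 0 := by
  rw [specF]
  have h0 : ¬ num = 0 := by omega
  simp [h0, h]

theorem specF_pos (lookup : List Int) (num : Int) (h : 0 < num) :
    specF lookup num = if lookup.getD num.toNat (-1) ≠ -1 then lookup.getD num.toNat (-1)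
      else specF lookup (num - 1) + specF lookup (num - 3) + specF lookup (num - 5) := by
  rw [specF]
  have h0 : ¬ num = 0 := by omega
  have h1 : ¬ num < 0 := by omega
  simp only [if_neg h0, if_neg h1]

-- invariant of A's mutated list relative to the original lookup
def InvA (lookup l : List Int) : Prop :=
  l.length = lookup.length ∧
  ∀ i : Nat, i < l.length →
    l.getD i (-1) = lookup.getD i (-1) ∨
    (lookup.getD i (-1) = -1 ∧ l.getD i (-1) = specF lookup (i : Int))

theorem solveAuxA_correct (lookup : List Int) :
    ∀ (n : Nat) (num : Int) (l : List Int), num.toNat = n → InvA lookup l →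
    (0 < num → num < (lookup.length : Int)) →
    ∃ l', solveAuxA num l = some (specF lookup num, l') ∧ InvA lookup l' := by
  intro n
  induction n using Nat.strong_induction_on with
  | _ n IH =>
    intro num l hn hInv hlt
    by_cases h0 : num = 0
    · refine ⟨l, ?_, hInv⟩
      rw [solveAuxA.eq_def]
      simp [h0, specF_zero]
    by_cases h1 : num < 0
    · refine ⟨l, ?_, hInv⟩
      rw [solveAuxA.eq_def]
      simp [h0, h1, specF_neg lookup num h1]
    have hpos : 0 < num := by omega
    have hlen : l.length = lookup.length := hInv.1
    have hlt' : num < (l.length : Int) := by rw [hlen]; exact hlt hpos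
    have hidx : num.toNat < l.length := by omega
    have hc2 : ((num.toNat : Nat) : Int) = num := by omega
    have hget : PySem.List.pyGet? l num = some l[num.toNat] :=
      PySem.List.pyGet?_eq_some_getElem l (by omega) hlt'
    have hD : l.getD num.toNat (-1) = l[num.toNat] := List.getD_eq_getElem l (-1) hidx
    have hi := hInv.2 num.toNat hidx
    by_cases hv : l[num.toNat] = -1
    · -- recompute and memoize
      have hlook : lookup.getD num.toNat (-1) = -1 := by
        rcases hi with h | h
        · rw [← h, hD, hv]
        · exact h.1
      obtain ⟨l1, e1, inv1⟩ := IH (num - 1).toNat (by omega) (num - 1) l rfl hInv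
        (by intro _; have := hlt hpos; omega)
      obtain ⟨l2, e2, inv2⟩ := IH (num - 3).toNat (by omega) (num - 3) l1 rfl inv1
        (by intro _; have := hlt hpos; omega)
      obtain ⟨l3, e3, inv3⟩ := IH (num - 5).toNat (by omega) (num - 5) l2 rfl inv2
        (by intro _; have := hlt hpos; omega)
      have hlen3 : l3.length = lookup.length := inv3.1
      have hidx3 : num.toNat < l3.length := by omega
      have hspec : specF lookup num
          = specF lookup (num - 1) + specF lookup (num - 3) + specF lookup (num - 5) := by
        rw [specF_pos lookup num hpos, if_neg (by rw [hlook]; decide)]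
      have hset : PySem.List.pySet? l3 num
            (specF lookup (num - 1) + specF lookup (num - 3) + specF lookup (num - 5))
          = some (l3.set num.toNat
            (specF lookup (num - 1) + specF lookup (num - 3) + specF lookup (num - 5))) := by
        rw [← hc2]; exact PySem.List.pySet?_natCast l3 num.toNat _ hidx3
      have hget4 : PySem.List.pyGet? (l3.set num.toNat
            (specF lookup (num - 1) + specF lookup (num - 3) + specF lookup (num - 5))) num
          = some (specF lookup (num - 1) + specF lookup (num - 3) + specF lookup (num - 5)) := by
        rw [PySem.List.pyGet?_eq_some_getElem _ (by omega)
          (by rw [List.length_set]; exact_mod_cast (by omega : num < (l3.length : Int)))]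
        congr 1
        exact List.getElem_set_self (by simpa using hidx3)
      refine ⟨l3.set num.toNat
        (specF lookup (num - 1) + specF lookup (num - 3) + specF lookup (num - 5)), ?_, ?_⟩
      · rw [solveAuxA.eq_def]
        simp only [if_neg h0, if_neg h1, hget]
        rw [if_neg (fun hcon => hcon hv)]
        simp only [e1, e2, e3, hset, hget4]
        rw [hspec]
      · constructor
        · rw [List.length_set, hlen3]
        · intro i hilen
          rw [List.length_set] at hilen
          by_cases hieq : i = num.toNat
          · subst hieq
            refine Or.inr ⟨hlook, ?_⟩
            rw [List.getD_eq_getElem _ _ (by rw [List.length_set]; exact hidx3),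
                List.getElem_set_self (by simpa using hidx3), hc2]
            exact hspec.symm
          · have hunch : ∀ v : Int, (l3.set num.toNat v).getD i (-1) = l3.getD i (-1) := by
              intro v
              rw [List.getD_eq_getElem _ _ (by rw [List.length_set]; exact hilen),
                  List.getD_eq_getElem _ _ hilen,
                  List.getElem_set_ne (by omega)]
            rw [hunch]
            exact inv3.2 i hilen
    · -- memoized (or pre-populated) value returned directly
      refine ⟨l, ?_, hInv⟩
      rw [solveAuxA.eq_def]
      simp only [if_neg h0, if_neg h1, hget]
      rw [if_pos hv]
      have : l[num.toNat] = specF lookup num := by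
        rcases hi with h | h
        · rw [specF_pos lookup num hpos, if_pos (by rw [← h, hD]; exact hv), ← h, hD]
        · have h2 := h.2
          rw [hc2] at h2
          rw [← h2, hD]
      rw [this]

-- B-side: the memo table is the list of specF values
theorem memo_getD (lookup : List Int) (j m : Nat) (hm : m < j + 1) :
    ((List.range (j + 1)).map (fun k : Nat => specF lookup (k : Int))).getD m 0
      = specF lookup (m : Int) := by
  rw [List.getD_eq_getElem _ _ (by simpa using hm)]
  simp

theorem memo_inv (lookup : List Int) (j : Nat) :
    (PySem.List.pyRange 1 ((j : Int) + 1) 1).foldl (stepB lookup) [1]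
      = (List.range (j + 1)).map (fun k : Nat => specF lookup (k : Int)) := by
  induction j with
  | zero =>
    rw [show ((0 : Nat) : Int) + 1 = 1 by norm_num, PySem.List.pyRange_one_eq_nil (by omega)]
    simp [List.range_succ, specF_zero]
  | succ j ih =>
    have hc : ((j + 1 : Nat) : Int) + 1 = ((j : Int) + 1) + 1 := by push_cast; ring
    rw [hc, PySem.List.pyRange_one_succ_right (by omega), List.foldl_append, ih]
    simp only [List.foldl_cons, List.foldl_nil]
    set i : Int := (j : Int) + 1 with hi
    have hipos : 0 < i := by omega
    have hcast : i = ((j + 1 : Nat) : Int) := by omega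
    have hgd : PySem.List.pyGetD lookup i (-1) = lookup.getD (j + 1) (-1) := by
      rw [hcast, PySem.List.pyGetD_natCast]
    have htn : i.toNat = j + 1 := by omega
    have hrhs : (List.range (j + 1 + 1)).map (fun k : Nat => specF lookup (k : Int))
        = (List.range (j + 1)).map (fun k : Nat => specF lookup (k : Int))
          ++ [specF lookup i] := by
      rw [List.range_succ, List.map_append, hcast]
      simp
    rw [hrhs, stepB]
    by_cases hv : lookup.getD (j + 1) (-1) = -1
    · rw [if_neg (by rw [hgd, hv]; decide)]
      congr 1
      have hterm : ∀ k : Int, 0 < k → k ≤ i →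
          ((List.range (j + 1)).map (fun k : Nat => specF lookup (k : Int))).getD (i - k).toNat 0
            = specF lookup (i - k) := by
        intro k hk0 hki
        have hm : (i - k).toNat < j + 1 := by omega
        rw [memo_getD lookup j _ hm]
        congr 1
        omega
      have hspec : specF lookup i = specF lookup (i - 1) + specF lookup (i - 3) + specF lookup (i - 5) := by
        rw [specF_pos lookup i hipos, if_neg (by rw [htn, hv]; decide)]
      rw [hspec]
      have e1 : (1 : Int) ≤ i := by omega
      by_cases h3 : (3 : Int) ≤ i
      · by_cases h5 : (5 : Int) ≤ i
        · have hfil : [(1 : Int), 3, 5].filter (fun k => decide (k ≤ i)) = [1, 3, 5] := by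
            simp [List.filter_nil, e1, h3, h5]
          rw [hfil]
          simp only [List.foldl_cons, List.foldl_nil]
          rw [hterm 1 (by omega) e1, hterm 3 (by omega) h3, hterm 5 (by omega) h5]
          norm_num
        · have hfil : [(1 : Int), 3, 5].filter (fun k => decide (k ≤ i)) = [1, 3] := by
            simp [List.filter_nil, e1, h3, h5]
          rw [hfil]
          simp only [List.foldl_cons, List.foldl_nil]
          rw [hterm 1 (by omega) e1, hterm 3 (by omega) h3,
              specF_neg lookup (i - 5) (by omega)]
          norm_num
      · have h5 : ¬ (5 : Int) ≤ i := by omega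
        have hfil : [(1 : Int), 3, 5].filter (fun k => decide (k ≤ i)) = [1] := by
          simp [List.filter_nil, e1, h3, h5]
        rw [hfil]
        simp only [List.foldl_cons, List.foldl_nil]
        rw [hterm 1 (by omega) e1,
            specF_neg lookup (i - 3) (by omega), specF_neg lookup (i - 5) (by omega)]
        norm_num
    · rw [if_pos (by rw [hgd]; exact hv)]
      congr 1
      rw [hgd, specF_pos lookup i hipos, if_pos (by rw [htn]; exact hv), htn]

theorem solve_alt_eq_specF (num : Int) (lookup : List Int) :
    solve_alt num lookup = specF lookup num := by
  rw [solve_alt]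
  by_cases hneg : num < 0
  · rw [if_pos hneg, specF_neg lookup num hneg]
  · rw [if_neg hneg]
    have hc : ((num.toNat : Nat) : Int) = num := by omega
    rw [show num + 1 = ((num.toNat : Nat) : Int) + 1 by omega, memo_inv lookup num.toNat,
        memo_getD lookup num.toNat num.toNat (by omega), hc]

-- ===== VERDICT (by name: the statement is the Claim_ definition above) =====
theorem solve_spec : Claim_equal_solve := by
  intro num lookup _ hpre
  unfold Spec_solve
  have hInv : InvA lookup lookup := ⟨rfl, fun i _ => Or.inl rfl⟩
  obtain ⟨l', hA, _⟩ := solveAuxA_correct lookup num.toNat num lookup rfl hInv hpre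
  rw [solve, hA, solve_alt_eq_specF num lookup]
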